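-- pv_equiv track=rewrite | github.com/hahnbeom/pyRefine | Critics/FaQ.empty/estogram2cst.fasig.py | ulr2trim
-- ===== SOURCE A (Python) =====
-- def list2part(inlist):
--     partlist = []
--     for i,comp in enumerate(inlist):
--         if isinstance(comp,int):
--             if i == 0 or abs(comp-prv) != 1:
--                 partlist.append([comp])
--             else:
--                 partlist[-1].append(comp)
--         elif isinstance(comp,str):
--             if i == 0 or comp != prv:
--                 partlist.append([comp])
--             else:
--                 partlist[-1].append(comp)
--         prv = comp
--     return partlist
--
-- def ulr2trim(ulr,nres):
--     totrim = []
--     ulr_by_reg = list2part(ulr)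
--
--     for reg in ulr_by_reg:
--         res1 = min(reg)
--         res2 = max(reg)
--         #if abs(res2-res1) > 5:
--         #    if res2 < nres: res2 -= 2
--         #    if res1 > 1: res1 += 2
--         if abs(res2-res1) > 3:
--             if res2 < nres: res2 -= 1
--             if res1 > 1: res1 += 1
--         totrim += range(res1,res2+1)
--     return totrim
-- ===== SOURCE B (Python) =====
-- def ulr2trim(ulr, nres):
--     # single pass: track current run's min/max and previous element; emit trimmed range at run boundaries
--     totrim = []
--
--     def emit(res1, res2):
--         if abs(res2 - res1) > 3:
--             if res2 < nres: res2 -= 1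
--             if res1 > 1: res1 += 1
--         totrim.extend(range(res1, res2 + 1))
--
--     prv = mn = mx = None
--     for c in ulr:
--         if mn is None:
--             mn = mx = c
--         elif abs(c - prv) == 1:
--             if c < mn: mn = c
--             if c > mx: mx = c
--         else:
--             emit(mn, mx)
--             mn = mx = c
--         prv = c
--     if mn is not None:
--         emit(mn, mx)
--     return totrim
-- ===== Notes on version B (the rewrite author's own statement) =====
-- stated objective: simpler
-- what changed: Fuses A's two phases (build an explicit list of run-lists, then re-scan each run with min()/max()) into one pass over ulr that keeps only the current run's running min/max and previous element, emitting each trimmed range at run boundaries; no intermediate group lists are materialised.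
import Mathlib
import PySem

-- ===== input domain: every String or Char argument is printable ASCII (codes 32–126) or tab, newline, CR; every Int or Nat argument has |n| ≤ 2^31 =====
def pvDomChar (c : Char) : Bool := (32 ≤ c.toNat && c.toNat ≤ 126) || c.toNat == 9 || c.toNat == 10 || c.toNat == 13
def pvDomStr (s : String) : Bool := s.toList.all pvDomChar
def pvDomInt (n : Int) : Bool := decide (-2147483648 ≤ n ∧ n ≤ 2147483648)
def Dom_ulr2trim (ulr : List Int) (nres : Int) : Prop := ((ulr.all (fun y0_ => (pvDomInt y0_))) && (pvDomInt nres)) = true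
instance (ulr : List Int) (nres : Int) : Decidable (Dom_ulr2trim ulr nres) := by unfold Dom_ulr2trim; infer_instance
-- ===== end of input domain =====

-- ===== PORT A =====
-- One honest line: B fuses A's two phases (grouping then re-scan) into a single pass with
-- running min/max; same values, a simpler decomposition (no speed claim).

-- min(reg)/max(reg) for a nonempty int list, ported by hand (exact for nonempty lists;
-- the 0 default is unreachable since every group is created nonempty).
def pyMinI (reg : List Int) : Int :=
  match reg with
  | [] => 0
  | h :: t => t.foldl min h

def pyMaxI (reg : List Int) : Int :=
  match reg with
  | [] => 0
  | h :: t => t.foldl max h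

-- partlist[-1].append(comp)
def appendLast (acc : List (List Int)) (c : Int) : List (List Int) :=
  match acc with
  | [] => []
  | [g] => [g ++ [c]]
  | g :: rest => g :: appendLast rest c

-- the loop of list2part (all elements are ints, so only the int branch is live)
def list2partLoop : List Int → Nat → Int → List (List Int) → List (List Int)
  | [], _, _, acc => acc
  | c :: rest, i, prv, acc =>
      if i = 0 ∨ (c - prv).natAbs ≠ 1 then
        list2partLoop rest (i + 1) c (acc ++ [[c]])
      else
        list2partLoop rest (i + 1) c (appendLast acc c)

def list2part (inlist : List Int) : List (List Int) :=
  list2partLoop inlist 0 0 []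

-- totrim += range(res1, res2+1) for one region
def emitA (nres : Int) (reg : List Int) : List Int :=
  let res1 := pyMinI reg
  let res2 := pyMaxI reg
  let res2 := if (res2 - res1).natAbs > 3 then (if res2 < nres then res2 - 1 else res2) else res2
  let res1 := if (pyMaxI reg - pyMinI reg).natAbs > 3 then (if res1 > 1 then res1 + 1 else res1) else res1
  PySem.List.pyRange res1 (res2 + 1) 1

def ulr2trim (ulr : List Int) (nres : Int) : List Int :=
  (list2part ulr).foldl (fun totrim reg => totrim ++ emitA nres reg) []

-- ===== PORT B =====
def emitB (nres res1 res2 : Int) : List Int :=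
  let res2' := if (res2 - res1).natAbs > 3 then (if res2 < nres then res2 - 1 else res2) else res2
  let res1' := if (res2 - res1).natAbs > 3 then (if res1 > 1 then res1 + 1 else res1) else res1
  PySem.List.pyRange res1' (res2' + 1) 1

def goB (nres : Int) : List Int → Int → Int → Int → List Int
  | [], mn, mx, _ => emitB nres mn mx
  | c :: rest, mn, mx, prv =>
      if (c - prv).natAbs = 1 then
        goB nres rest (min mn c) (max mx c) c
      else
        emitB nres mn mx ++ goB nres rest c c c

def ulr2trim_alt (ulr : List Int) (nres : Int) : List Int :=
  match ulr with
  | [] => []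
  | c :: rest => goB nres rest c c c

-- ===== PRECONDITION & SPEC =====
def Spec_ulr2trim (ulr : List Int) (nres : Int) (out : List Int) : Prop := out = ulr2trim_alt ulr nres
instance (ulr : List Int) (nres : Int) (out : List Int) : Decidable (Spec_ulr2trim ulr nres out) := by unfold Spec_ulr2trim; infer_instance

-- ===== CLAIM =====
def Claim_equal_ulr2trim : Prop := ∀ (ulr : List Int) (nres : Int), Dom_ulr2trim ulr nres → Spec_ulr2trim ulr nres (ulr2trim ulr nres)

-- ===== LEMMAS AND PROOFS =====

theorem appendLast_append (acc : List (List Int)) (g : List Int) (c : Int) :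
    appendLast (acc ++ [g]) c = acc ++ [g ++ [c]] := by
  induction acc with
  | nil => rfl
  | cons h t ih =>
      cases t with
      | nil => simp [appendLast]
      | cons h2 t2 =>
          simp only [List.cons_append, appendLast] at ih ⊢
          rw [ih]

theorem pyMinI_append (g : List Int) (hg : g ≠ []) (c : Int) :
    pyMinI (g ++ [c]) = min (pyMinI g) c := by
  cases g with
  | nil => exact absurd rfl hg
  | cons h t => simp [pyMinI, List.foldl_append]

theorem pyMaxI_append (g : List Int) (hg : g ≠ []) (c : Int) :
    pyMaxI (g ++ [c]) = max (pyMaxI g) c := by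
  cases g with
  | nil => exact absurd rfl hg
  | cons h t => simp [pyMaxI, List.foldl_append]

theorem foldl_emit_eq (gs : List (List Int)) (nres : Int) (init : List Int) :
    gs.foldl (fun totrim reg => totrim ++ emitA nres reg) init
      = init ++ gs.flatMap (emitA nres) := by
  induction gs generalizing init with
  | nil => simp
  | cons g t ih => simp [List.foldl_cons, ih, List.flatMap_cons]

theorem emitA_eq_emitB (nres : Int) (reg : List Int) :
    emitA nres reg = emitB nres (pyMinI reg) (pyMaxI reg) := rfl

-- Main loop invariant: processing the tail with A's grouping loop, where the
-- last group g is nonempty with last element prv, equals B's single-pass run.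
theorem loop_invariant (xs : List Int) (nres : Int) :
    ∀ (i : Nat) (acc : List (List Int)) (g : List Int) (prv : Int),
      g ≠ [] → g.getLast? = some prv →
      (list2partLoop xs (i + 1) prv (acc ++ [g])).flatMap (emitA nres)
        = acc.flatMap (emitA nres) ++ goB nres xs (pyMinI g) (pyMaxI g) prv := by
  induction xs with
  | nil =>
      intro i acc g prv hg _
      simp [list2partLoop, goB, List.flatMap_append, emitA_eq_emitB]
  | cons c rest ih =>
      intro i acc g prv hg hlast
      by_cases h : (c - prv).natAbs = 1
      · have hloop : list2partLoop (c :: rest) (i + 1) prv (acc ++ [g])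
            = list2partLoop rest (i + 2) c (acc ++ [g ++ [c]]) := by
          simp [list2partLoop, h, appendLast_append]
        rw [hloop]
        have hgc : g ++ [c] ≠ [] := by simp
        have hlastc : (g ++ [c]).getLast? = some c := by simp
        rw [ih (i + 1) acc (g ++ [c]) c hgc hlastc,
            pyMinI_append g hg c, pyMaxI_append g hg c]
        simp [goB, h]
      · have hloop : list2partLoop (c :: rest) (i + 1) prv (acc ++ [g])
            = list2partLoop rest (i + 2) c ((acc ++ [g]) ++ [[c]]) := by
          simp [list2partLoop, h]
        rw [hloop]
        have h1 : ([c] : List Int) ≠ [] := by simp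
        have h2 : ([c] : List Int).getLast? = some c := by simp
        rw [ih (i + 1) (acc ++ [g]) [c] c h1 h2]
        simp [goB, h, pyMinI, pyMaxI, List.flatMap_append, emitA_eq_emitB]

-- ===== VERDICT =====
theorem ulr2trim_spec : Claim_equal_ulr2trim := by
  intro ulr nres _
  show ulr2trim ulr nres = ulr2trim_alt ulr nres
  cases ulr with
  | nil => rfl
  | cons c rest =>
      unfold ulr2trim ulr2trim_alt list2part
      have h0 : list2partLoop (c :: rest) 0 0 [] = list2partLoop rest 1 c [[c]] := by
        simp [list2partLoop]
      rw [h0, foldl_emit_eq]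
      have := loop_invariant rest nres 0 [] [c] c (by simp) (by simp)
      simpa [pyMinI, pyMaxI] using this
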